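-- pv_equiv track=rewrite | github.com/Marmik123/Data-Structure-and-Algorithms-Practise | union_of_array.py | doUnion
-- ===== SOURCE A (Python) =====
-- def doUnion(a,n,b,m):
--     temp=[]
--     result =[]
--     for i in range(len(a)):
--         temp.append(a[i])
--     #code here
--     for j in range(len(b)):
--         temp.append(b[j])
--     result=set(temp)
--     return len(result)
-- ===== SOURCE B (Python) =====
-- def doUnion(a, n, b, m):
--     xs = sorted(a + b)
--     if not xs:
--         return 0
--     count = 1
--     for i in range(1, len(xs)):
--         if xs[i] != xs[i - 1]:
--             count += 1
--     return count
-- ===== Notes on version B (the rewrite author's own statement) =====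
-- stated objective: alternative
-- what changed: Replaces hash-set deduplication (append all elements, build a set, take its size) with sort-then-adjacent-compare: concatenate, sort, and count positions whose value differs from the previous one.
import Mathlib
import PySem

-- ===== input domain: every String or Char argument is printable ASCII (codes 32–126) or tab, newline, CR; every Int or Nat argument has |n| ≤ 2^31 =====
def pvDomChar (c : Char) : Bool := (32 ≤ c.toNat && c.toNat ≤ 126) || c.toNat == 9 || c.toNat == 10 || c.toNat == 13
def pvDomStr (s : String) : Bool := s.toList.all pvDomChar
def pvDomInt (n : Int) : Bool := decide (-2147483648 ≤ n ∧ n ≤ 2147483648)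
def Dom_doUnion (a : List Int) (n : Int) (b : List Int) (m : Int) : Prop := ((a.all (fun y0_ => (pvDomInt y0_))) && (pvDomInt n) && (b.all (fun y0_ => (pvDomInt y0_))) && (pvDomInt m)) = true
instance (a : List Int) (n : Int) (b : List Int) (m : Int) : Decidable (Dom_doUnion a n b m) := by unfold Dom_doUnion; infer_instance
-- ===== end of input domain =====

-- B replaces A's hash-set deduplication with sort-then-adjacent-compare counting (alternative algorithm, same results).

-- ===== PORT A =====
-- temp=[]; for i in range(len(a)): temp.append(a[i]); for j in range(len(b)): temp.append(b[j]); return len(set(temp))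
-- (indices produced by range(len(·)) are always in range, so pyGetD's default 0 is never used)
def doUnion (a : List Int) (n : Int) (b : List Int) (m : Int) : Int :=
  let temp : List Int :=
    (PySem.List.pyRange 0 (a.length : Int) 1).foldl (fun t i => t ++ [PySem.List.pyGetD a i 0]) []
  let temp :=
    (PySem.List.pyRange 0 (b.length : Int) 1).foldl (fun t j => t ++ [PySem.List.pyGetD b j 0]) temp
  let result : PySem.Set Int := PySem.Set.ofList temp
  PySem.Set.len result

-- ===== PORT B =====
-- the for-loop of Source B: count (1 if xs[i] != xs[i-1] else 0) over the tail, carrying the previous element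
def pvCountAdj (prev : Int) : List Int → Int
  | [] => 0
  | y :: ys => (if y = prev then 0 else 1) + pvCountAdj y ys

def doUnion_alt (a : List Int) (n : Int) (b : List Int) (m : Int) : Int :=
  let xs := PySem.List.sorted (a ++ b) (fun x => x) false
  match xs with
  | [] => 0
  | x :: t => 1 + pvCountAdj x t

-- ===== PRECONDITION & SPEC =====
def Spec_doUnion (a : List Int) (n : Int) (b : List Int) (m : Int) (out : Int) : Prop := out = doUnion_alt a n b m
instance (a : List Int) (n : Int) (b : List Int) (m : Int) (out : Int) : Decidable (Spec_doUnion a n b m out) := by unfold Spec_doUnion; infer_instance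

-- ===== CLAIM (what is proved, stated in full; the proofs are below) =====
def Claim_equal_doUnion : Prop := ∀ (a : List Int) (n : Int) (b : List Int) (m : Int), Dom_doUnion a n b m → Spec_doUnion a n b m (doUnion a n b m)

-- ===== LEMMAS AND PROOFS =====

theorem foldl_append_build (l : List Int) (init : List Int) :
    l.foldl (fun t x => t ++ [x]) init = init ++ l := by
  induction l generalizing init with
  | nil => simp
  | cons x xs ih => simp [List.foldl, ih]

theorem fold_getD (l : List Int) (init : List Int) :
    (PySem.List.pyRange 0 (l.length : Int) 1).foldl
      (fun t i => t ++ [PySem.List.pyGetD l i 0]) init = init ++ l := by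
  rw [PySem.List.foldl_pyRange_zero_pyGetD' l 0 (fun t x => t ++ [x]) init, foldl_append_build]

theorem doUnion_eq_set_len (a : List Int) (n : Int) (b : List Int) (m : Int) :
    doUnion a n b m = ((PySem.Set.ofList (a ++ b)).length : Int) := by
  simp only [doUnion, fold_getD, List.nil_append]
  simp [PySem.Set.len]

theorem ofList_length_eq_card (l : List Int) :
    (PySem.Set.ofList l).length = l.toFinset.card := by
  have hnd : (PySem.Set.ofList l).Nodup := PySem.Set.nodup_ofList l
  have : (PySem.Set.ofList l).toFinset = l.toFinset := by
    ext x; simp [List.mem_toFinset, PySem.Set.mem_ofList]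
  rw [← List.toFinset_card_of_nodup hnd, this]

theorem countAdj_eq (t : List Int) : ∀ prev : Int, t.Pairwise (· ≤ ·) →
    (∀ y ∈ t, prev ≤ y) → pvCountAdj prev t = ((t.toFinset \ {prev}).card : Int) := by
  induction t with
  | nil => intro prev _ _; simp [pvCountAdj]
  | cons y ys ih =>
    intro prev hp hle
    have hp' : ys.Pairwise (· ≤ ·) := hp.of_cons
    have hyle : ∀ z ∈ ys, y ≤ z := fun z hz => List.rel_of_pairwise_cons hp hz
    by_cases hy : y = prev
    · subst hy
      have : (insert y ys.toFinset) \ {y} = ys.toFinset \ {y} := by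
        apply Finset.insert_sdiff_of_mem; simp
      simp only [pvCountAdj, if_true, List.toFinset_cons, this, zero_add]
      exact ih y hp' hyle
    · have hprevlt : ∀ z ∈ y :: ys, prev < z := by
        intro z hz
        rcases List.mem_cons.mp hz with rfl | hz'
        · exact lt_of_le_of_ne (hle _ (List.mem_cons_self)) (fun h => hy h.symm)
        · exact lt_of_lt_of_le
            (lt_of_le_of_ne (hle _ (List.mem_cons_self)) (fun h => hy h.symm)) (hyle _ hz')
      have hnot : prev ∉ (y :: ys).toFinset := by
        simp only [List.mem_toFinset]
        intro h; exact lt_irrefl prev (hprevlt _ h)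
      have h1 : (y :: ys).toFinset \ {prev} = (y :: ys).toFinset :=
        Finset.sdiff_eq_self_of_disjoint (by simpa using hnot)
      have h2 : (y :: ys).toFinset = insert y (ys.toFinset.erase y) := by
        ext z; by_cases hz : z = y <;> simp [hz]
      have h3 : ((y :: ys).toFinset).card = (ys.toFinset.erase y).card + 1 := by
        rw [h2, Finset.card_insert_of_notMem (Finset.notMem_erase _ _)]
      have h4 : ys.toFinset \ {y} = ys.toFinset.erase y := by
        simp [Finset.sdiff_singleton_eq_erase]
      simp only [pvCountAdj, if_neg hy]
      rw [ih y hp' hyle, h1, h3, h4]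
      push_cast
      ring

theorem alt_eq_card (a : List Int) (n : Int) (b : List Int) (m : Int) :
    doUnion_alt a n b m = (((a ++ b).toFinset).card : Int) := by
  have hperm : (PySem.List.sorted (a ++ b) (fun x => x) false).Perm (a ++ b) :=
    PySem.List.sorted_perm _ _ _
  have hfs : (PySem.List.sorted (a ++ b) (fun x => x) false).toFinset = (a ++ b).toFinset :=
    List.toFinset_eq_of_perm _ _ hperm
  have hpw : (PySem.List.sorted (a ++ b) (fun x => x) false).Pairwise (· ≤ ·) := by
    simpa using PySem.List.sorted_pairwise (a ++ b) (fun x => x)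
  rcases hs : PySem.List.sorted (a ++ b) (fun x => x) false with _ | ⟨x, t⟩
  · rw [hs] at hfs
    simp only [doUnion_alt, hs]
    simp [← hfs]
  · rw [hs] at hfs hpw
    simp only [doUnion_alt, hs]
    have hp' : t.Pairwise (· ≤ ·) := hpw.of_cons
    have hle : ∀ y ∈ t, x ≤ y := fun z hz => List.rel_of_pairwise_cons hpw hz
    rw [countAdj_eq t x hp' hle, ← hfs]
    have h2 : (x :: t).toFinset = insert x (t.toFinset.erase x) := by
      ext z; by_cases hz : z = x <;> simp [hz]
    have h3 : ((x :: t).toFinset).card = (t.toFinset.erase x).card + 1 := by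
      rw [h2, Finset.card_insert_of_notMem (Finset.notMem_erase _ _)]
    have h4 : t.toFinset \ {x} = t.toFinset.erase x := by
      simp [Finset.sdiff_singleton_eq_erase]
    rw [h4, h3]
    push_cast
    ring

-- ===== VERDICT (by name: the statement is the Claim_ definition above) =====
theorem doUnion_spec : Claim_equal_doUnion := by
  intro a n b m _
  unfold Spec_doUnion
  rw [doUnion_eq_set_len, ofList_length_eq_card, alt_eq_card]
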